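-- pv_equiv track=rewrite | github.com/sarathsaimleap/Labeller | main.py | divide_images
-- ===== SOURCE A (Python) =====
-- def divide_images(images, people_names):
--     num_images = len(images)
--     num_people = len(people_names)
--     images_per_person = num_images // num_people
--     remainder = num_images % num_people
--     start = 0
--     end = 0
--     people_images = {}
--     for i, name in enumerate(people_names):
--         end += images_per_person
--         if remainder > 0:
--             end += 1
--             remainder -= 1
--         people_images[name] = images[start:end]
--         start = end
--     return people_images
-- ===== SOURCE B (Python) =====
-- def divide_images(images, people_names):
--     # Inverse mapping: instead of slicing a chunk per person, compute for each
--     # image the index of the person who owns it and scatter the images into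
--     # per-person chunks, then pair names with chunks.
--     q, r = divmod(len(images), len(people_names))
--     chunks = [[] for _ in people_names]
--     for j, img in enumerate(images):
--         chunks[j // (q + 1) if j < r * (q + 1) else (j - r) // q].append(img)
--     return {name: chunk for name, chunk in zip(people_names, chunks)}
-- ===== Notes on version B (the rewrite author's own statement) =====
-- stated objective: alternative
-- what changed: Inverted the traversal: instead of walking people and slicing off a contiguous chunk per person with running start/end accumulators, B walks the images once, computes each image's owner index in closed form, scatters the images into per-person chunk lists, and zips names with chunks into the dict.
import Mathlib
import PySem

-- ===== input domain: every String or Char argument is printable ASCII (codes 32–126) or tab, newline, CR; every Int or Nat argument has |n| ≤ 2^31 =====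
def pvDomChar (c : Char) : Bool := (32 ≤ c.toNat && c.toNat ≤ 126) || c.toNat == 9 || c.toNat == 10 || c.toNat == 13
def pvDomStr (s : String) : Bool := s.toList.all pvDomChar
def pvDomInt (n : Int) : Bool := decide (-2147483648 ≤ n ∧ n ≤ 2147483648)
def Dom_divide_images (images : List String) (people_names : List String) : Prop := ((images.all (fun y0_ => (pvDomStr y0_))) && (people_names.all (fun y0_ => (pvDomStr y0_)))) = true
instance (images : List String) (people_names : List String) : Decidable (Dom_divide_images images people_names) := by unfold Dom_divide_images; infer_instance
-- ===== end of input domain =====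

-- B inverts the traversal: instead of slicing a contiguous chunk per person, it
-- computes for each image the index of the person who owns it, scatters the
-- images into per-person chunks, then pairs names with chunks (alternative
-- algorithm, same cost).

-- ===== PORT A =====
-- loop body of A: state = (start, end, remainder, people_images)
def stepA (images : List String) (q : Int)
    (s : Int × Int × Int × PySem.Dict String (List String)) (p : Int × String) :
    Int × Int × Int × PySem.Dict String (List String) :=
  let start := s.1
  let e := s.2.1 + q
  let rem := s.2.2.1
  let e' := if rem > 0 then e + 1 else e
  let rem' := if rem > 0 then rem - 1 else rem
  (e', e', rem', s.2.2.2.insert p.2 (PySem.List.slice images (some start) (some e')))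

def divide_images (images : List String) (people_names : List String) : List (String × List String) :=
  let num_images : Int := images.length
  let num_people : Int := people_names.length
  let images_per_person := PySem.Int.floordiv num_images num_people
  let remainder := PySem.Int.mod num_images num_people
  ((PySem.List.enumerate people_names 0).foldl (stepA images images_per_person)
    (0, 0, remainder, PySem.Dict.empty)).2.2.2.items

-- ===== PORT B =====
-- owner of image j: 'j // (q + 1) if j < r * (q + 1) else (j - r) // q'
def ownerB (q r j : Int) : Int :=
  if j < r * (q + 1) then PySem.Int.floordiv j (q + 1) else PySem.Int.floordiv (j - r) q

-- loop body of B: chunks[owner].append(img).  Python's list indexing on 'chunks'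
-- is ported as set/getD at the owner index; inside Pre_ that index is always in
-- range (proved by owner_range below), where this is exact.
def stepB (q r : Int) (cs : List (List String)) (p : Int × String) : List (List String) :=
  cs.set (ownerB q r p.1).toNat (cs.getD (ownerB q r p.1).toNat [] ++ [p.2])

def divide_images_alt (images : List String) (people_names : List String) : List (String × List String) :=
  let q := PySem.Int.floordiv (images.length : Int) (people_names.length : Int)
  let r := PySem.Int.mod (images.length : Int) (people_names.length : Int)
  let chunks := (PySem.List.enumerate images 0).foldl (stepB q r)
      (people_names.map (fun _ => ([] : List String)))
  ((people_names.zip chunks).foldl (fun d p => d.insert p.1 p.2) PySem.Dict.empty).items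

-- ===== PRECONDITION & SPEC =====
-- Pre_ excludes only empty people_names, where both Pythons raise ZeroDivisionError.
def Pre_divide_images (images : List String) (people_names : List String) : Prop :=
  people_names ≠ []
instance (images : List String) (people_names : List String) : Decidable (Pre_divide_images images people_names) := by unfold Pre_divide_images; infer_instance

def pvWitness_divide_images : List String × List String :=
  (["img0", "img1", "img2"], ["alice", "bob"])

def Spec_divide_images (images : List String) (people_names : List String) (out : List (String × List String)) : Prop := out = divide_images_alt images people_names
instance (images : List String) (people_names : List String) (out : List (String × List String)) : Decidable (Spec_divide_images images people_names out) := by unfold Spec_divide_images; infer_instance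

-- ===== CLAIM (what is proved, stated in full; the proofs are below) =====
def Claim_equal_divide_images : Prop := ∀ (images : List String) (people_names : List String), Dom_divide_images images people_names → Pre_divide_images images people_names → Spec_divide_images images people_names (divide_images images people_names)

-- ===== LEMMAS AND PROOFS =====

-- A's closed-form step: person i gets images[i*q + min i r : (i+1)*q + min (i+1) r]
def stepAc (images : List String) (q r : Int)
    (d : PySem.Dict String (List String)) (p : Int × String) :
    PySem.Dict String (List String) :=
  d.insert p.2 (PySem.List.slice images
    (some (p.1 * q + min p.1 r)) (some ((p.1 + 1) * q + min (p.1 + 1) r)))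

-- loop invariant: at index i, A's start = end = i*q + min i r and remainder = r - min i r
theorem loop_eq (images : List String) (q r : Int) :
    ∀ (names : List String) (i : Int) (d : PySem.Dict String (List String)),
    ((PySem.List.enumerate names i).foldl (stepA images q)
        (i * q + min i r, i * q + min i r, r - min i r, d)).2.2.2
      = (PySem.List.enumerate names i).foldl (stepAc images q r) d := by
  intro names
  induction names with
  | nil => intro i d; simp [PySem.List.enumerate]
  | cons x xs ih =>
    intro i d
    rw [PySem.List.enumerate_cons]
    rw [List.foldl_cons, List.foldl_cons]
    have hstep : stepA images q (i * q + min i r, i * q + min i r, r - min i r, d) (i, x)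
        = ((i+1) * q + min (i+1) r, (i+1) * q + min (i+1) r, r - min (i+1) r,
           stepAc images q r d (i, x)) := by
      simp only [stepA, stepAc]
      by_cases h : i < r
      · have hmin : min i r = i := by omega
        have hmin' : min (i+1) r = i + 1 := by omega
        have hb : i * q + i + q + 1 = (i + 1) * q + (i + 1) := by ring
        simp only [hmin, hmin', if_pos (show r - i > 0 by omega), hb, Prod.mk.injEq]
        exact ⟨trivial, trivial, by omega, trivial⟩
      · have hmin : min i r = r := by omega
        have hmin' : min (i+1) r = r := by omega
        have hb : i * q + r + q = (i + 1) * q + r := by ring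
        simp only [hmin, hmin', if_neg (show ¬ r - r > 0 by omega), hb]
    rw [hstep]
    exact ih (i + 1) (stepAc images q r d (i, x))

-- the owner index is always within [0, k) for an image index within [0, n)
theorem owner_range (q r k n j : Int) (hq : 0 ≤ q) (hr : 0 ≤ r) (hrk : r < k)
    (hn : k * q + r = n) (hj0 : 0 ≤ j) (hjn : j < n) :
    0 ≤ ownerB q r j ∧ ownerB q r j < k := by
  unfold ownerB
  by_cases h : j < r * (q + 1)
  · rw [if_pos h]
    constructor
    · rw [PySem.Int.le_floordiv_iff_mul_le (by omega)]; nlinarith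
    · have : PySem.Int.floordiv j (q + 1) < r := by
        rw [PySem.Int.floordiv_lt_iff_lt_mul (by omega)]; exact h
      omega
  · rw [if_neg h]
    have hq0 : 0 < q := by nlinarith
    constructor
    · rw [PySem.Int.le_floordiv_iff_mul_le hq0]; nlinarith
    · rw [PySem.Int.floordiv_lt_iff_lt_mul hq0]; nlinarith

-- ownerB q r j = i iff image j lies in person i's chunk
theorem owner_iff (q r k n j i : Int) (hq : 0 ≤ q) (hr : 0 ≤ r) (hrk : r < k)
    (hn : k * q + r = n) (hj0 : 0 ≤ j) (hjn : j < n) (hi0 : 0 ≤ i) (hik : i < k) :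
    (ownerB q r j = i ↔ i * q + min i r ≤ j ∧ j < (i + 1) * q + min (i + 1) r) := by
  unfold ownerB
  by_cases h : j < r * (q + 1)
  · rw [if_pos h, PySem.Int.floordiv_eq_iff_of_pos (by omega)]
    constructor
    · rintro ⟨h1, h2⟩
      have hir : i < r := by nlinarith
      have hm1 : min i r = i := by omega
      have hm2 : min (i + 1) r = i + 1 := by omega
      rw [hm1, hm2]
      constructor <;> nlinarith
    · rintro ⟨h1, h2⟩
      have hir : i < r := by
        by_contra hc
        have : min i r = r := by omega
        rw [this] at h1
        nlinarith
      have hm1 : min i r = i := by omega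
      have hm2 : min (i + 1) r = i + 1 := by omega
      rw [hm1] at h1
      rw [hm2] at h2
      constructor <;> nlinarith
  · rw [if_neg h]
    have hq0 : 0 < q := by nlinarith
    rw [PySem.Int.floordiv_eq_iff_of_pos hq0]
    constructor
    · rintro ⟨h1, h2⟩
      have hir : r ≤ i := by nlinarith
      have hm1 : min i r = r := by omega
      have hm2 : min (i + 1) r = r := by omega
      rw [hm1, hm2]
      constructor <;> nlinarith
    · rintro ⟨h1, h2⟩
      have hir : r ≤ i := by
        by_contra hc
        have hm2 : min (i + 1) r = i + 1 := by omega
        rw [hm2] at h2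
        nlinarith
      have hm1 : min i r = r := by omega
      have hm2 : min (i + 1) r = r := by omega
      rw [hm1] at h1
      rw [hm2] at h2
      constructor <;> nlinarith

-- filtering an enumerated list by an index range is a slice (drop/take form)
theorem filter_enum_range {α : Type} :
    ∀ (xs : List α) (s lo hi : Int),
    ((PySem.List.enumerate xs s).filter
        (fun p => decide (lo ≤ p.1 ∧ p.1 < hi))).map (fun p => p.2)
      = (xs.drop (lo - s).toNat).take (hi - max lo s).toNat := by
  intro xs
  induction xs with
  | nil => intro s lo hi; simp [PySem.List.enumerate]
  | cons x xs ih =>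
    intro s lo hi
    rw [PySem.List.enumerate_cons]
    by_cases hkeep : lo ≤ s ∧ s < hi
    · rw [List.filter_cons_of_pos (by simpa using hkeep)]
      rw [List.map_cons, ih (s + 1) lo hi]
      have h1 : (lo - s).toNat = 0 := by omega
      have h2 : (lo - (s + 1)).toNat = 0 := by omega
      have h3 : (hi - max lo s).toNat = (hi - max lo (s + 1)).toNat + 1 := by omega
      rw [h1, h2, h3]
      simp [List.take_succ_cons]
    · rw [List.filter_cons_of_neg (by simpa using hkeep)]
      rw [ih (s + 1) lo hi]
      by_cases hs : s < lo
      · have h1 : (lo - s).toNat = (lo - (s + 1)).toNat + 1 := by omega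
        have h2 : max lo s = lo := by omega
        have h3 : max lo (s + 1) = lo := by omega
        rw [h1, h2, h3, List.drop_succ_cons]
      · have h1 : (lo - s).toNat = 0 := by omega
        have h2 : (lo - (s + 1)).toNat = 0 := by omega
        have h4 : (hi - max lo s).toNat = 0 := by omega
        have h5 : (hi - max lo (s + 1)).toNat = 0 := by omega
        rw [h1, h2, h4, h5]
        simp

-- the drop/take form produced by filter_enum_range at s = 0 is exactly a slice
theorem drop_take_eq_slice {α : Type} (xs : List α) (lo hi : Int)
    (h0 : 0 ≤ lo) (h1 : lo ≤ hi) :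
    (xs.drop (lo - 0).toNat).take (hi - max lo 0).toNat
      = PySem.List.slice xs (some lo) (some hi) := by
  rw [PySem.List.slice_toNat xs h0 (le_trans h0 h1)]
  have e1 : (lo - 0).toNat = lo.toNat := by omega
  have e2 : (hi - max lo 0).toNat = hi.toNat - lo.toNat := by omega
  rw [e1, e2]

-- scattering preserves the number of chunks
theorem scatter_length {α β : Type} (f : β → Int) (v : β → α) :
    ∀ (l : List β) (cs : List (List α)),
    (l.foldl (fun cs p => cs.set (f p).toNat (cs.getD (f p).toNat [] ++ [v p])) cs).length
      = cs.length := by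
  intro l
  induction l with
  | nil => intro cs; rfl
  | cons p l ih =>
    intro cs
    rw [List.foldl_cons, ih, List.length_set]

-- chunk i of the scatter loop collects, in order, exactly the values whose owner is i
theorem scatter_getD {α β : Type} (f : β → Int) (v : β → α) :
    ∀ (l : List β) (cs : List (List α)) (i : Nat), i < cs.length →
    (∀ p ∈ l, 0 ≤ f p ∧ f p < (cs.length : Int)) →
    (l.foldl (fun cs p => cs.set (f p).toNat (cs.getD (f p).toNat [] ++ [v p])) cs).getD i []
      = cs.getD i [] ++ (l.filter (fun p => decide (f p = (i : Int)))).map v := by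
  intro l
  induction l with
  | nil => intro cs i hi hmem; simp
  | cons p l ih =>
    intro cs i hi hmem
    obtain ⟨hp0, hpk⟩ := hmem p List.mem_cons_self
    have hplt : (f p).toNat < cs.length := by omega
    rw [List.foldl_cons]
    rw [ih (cs.set (f p).toNat (cs.getD (f p).toNat [] ++ [v p])) i
      (by rw [List.length_set]; exact hi)
      (by intro x hx; rw [List.length_set]; exact hmem x (List.mem_cons_of_mem p hx))]
    rw [List.filter_cons]
    by_cases howner : f p = (i : Int)
    · have hnat : (f p).toNat = i := by omega
      rw [if_pos (by simpa using howner)]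
      rw [hnat]
      rw [List.getD_eq_getElem _ _
        (show i < (cs.set i (cs.getD i [] ++ [v p])).length by
          rw [List.length_set]; exact hi)]
      rw [List.getElem_set_self]
      simp
    · have hnat : (f p).toNat ≠ i := by omega
      rw [if_neg (by simpa using howner)]
      rw [List.getD_eq_getElem _ _ (by rw [List.length_set]; exact hi),
        List.getD_eq_getElem _ _ hi]
      rw [List.getElem_set_ne hnat]

theorem divide_images_spec : Claim_equal_divide_images := by
  intro images names _ hne
  unfold Spec_divide_images divide_images divide_images_alt
  dsimp only
  set n : Int := (images.length : Int) with hn_def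
  set k : Int := (names.length : Int) with hk_def
  set q : Int := PySem.Int.floordiv n k with hq_def
  set r : Int := PySem.Int.mod n k with hr_def
  have hkpos : 0 < k := by
    have : 0 < names.length := List.length_pos_of_ne_nil hne
    omega
  have hq0 : 0 ≤ q := by
    rw [hq_def, hn_def, hk_def, PySem.Int.floordiv_natCast]
    exact Int.natCast_nonneg _
  have hr0 : 0 ≤ r := PySem.Int.mod_nonneg n hkpos
  have hrk : r < k := PySem.Int.mod_lt n hkpos
  have heq : k * q + r = n := by
    have := PySem.Int.floordiv_mul_add_mod n k
    rw [← hq_def, ← hr_def] at this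
    linarith [this]
  -- ===== A side: the loop is a fold of closed-form inserts =====
  have hA : ((PySem.List.enumerate names 0).foldl (stepA images q)
        (0, 0, r, PySem.Dict.empty)).2.2.2
      = ((PySem.List.enumerate names 0).map (fun p =>
          (p.2, PySem.List.slice images (some (p.1 * q + min p.1 r))
                  (some ((p.1 + 1) * q + min (p.1 + 1) r))))).foldl
          (fun d p => d.insert p.1 p.2) PySem.Dict.empty := by
    have h0 : (0 : Int) * q + min 0 r = 0 := by
      have : min (0 : Int) r = 0 := by omega
      rw [this]; ring
    have h0' : r - min 0 r = r := by
      have : min (0 : Int) r = 0 := by omega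
      omega
    have hle := loop_eq images q r names 0 PySem.Dict.empty
    rw [h0, h0'] at hle
    rw [hle, List.foldl_map]
    rfl
  rw [hA]
  -- ===== B side: the scatter chunks are exactly A's slices =====
  set init : List (List String) := names.map (fun _ => ([] : List String)) with hinit_def
  have hinitlen : init.length = names.length := by rw [hinit_def, List.length_map]
  have hflam : stepB q r = (fun cs (p : Int × String) =>
      cs.set ((fun p : Int × String => ownerB q r p.1) p).toNat
        (cs.getD ((fun p : Int × String => ownerB q r p.1) p).toNat []
          ++ [(fun p : Int × String => p.2) p])) := rfl
  have hmem : ∀ p ∈ PySem.List.enumerate images 0,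
      0 ≤ ownerB q r p.1 ∧ ownerB q r p.1 < (init.length : Int) := by
    intro p hp
    obtain ⟨j, hjlt, hpeq⟩ := (PySem.List.mem_enumerate_iff images 0 p).mp hp
    subst hpeq
    simp only [zero_add]
    have hjn : (j : Int) < n := by rw [hn_def]; exact_mod_cast hjlt
    have := owner_range q r k n (j : Int) hq0 hr0 hrk heq (Int.natCast_nonneg j) hjn
    rw [hinitlen, ← hk_def]
    exact this
  have hchunkslen : ((PySem.List.enumerate images 0).foldl (stepB q r) init).length
      = names.length := by
    rw [hflam, scatter_length, hinitlen]
  -- chunk i of the scatter is exactly A's slice for person i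
  have hchunks : (PySem.List.enumerate images 0).foldl (stepB q r) init
      = (PySem.List.enumerate names 0).map (fun p =>
          PySem.List.slice images (some (p.1 * q + min p.1 r))
            (some ((p.1 + 1) * q + min (p.1 + 1) r))) := by
    apply List.ext_getElem
    · rw [hchunkslen, List.length_map]
      simp [PySem.List.enumerate_eq_zipIdx_map]
    · intro i hi1 hi2
      have hilen : i < names.length := by rw [← hchunkslen]; exact hi1
      rw [List.getElem_map,
        PySem.List.getElem_enumerate names 0 i
          (by simpa [PySem.List.enumerate_eq_zipIdx_map] using hi2)]
      simp only [zero_add]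
      rw [(List.getD_eq_getElem _ [] hi1).symm, hflam,
        scatter_getD _ _ _ init i (by rw [hinitlen]; exact hilen) hmem]
      have hinitD : init.getD i [] = [] := by
        rw [hinit_def, List.getD_eq_getElem _ _ (by rw [List.length_map]; exact hilen)]
        simp
      rw [hinitD, List.nil_append]
      -- bounds facts for person i
      have hlo0 : 0 ≤ (i : Int) * q + min (i : Int) r := by
        have hm : 0 ≤ min (i : Int) r := by
          have : (0 : Int) ≤ (i : Int) := Int.natCast_nonneg i
          omega
        have : 0 ≤ (i : Int) * q := mul_nonneg (Int.natCast_nonneg i) hq0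
        omega
      have hlohi : (i : Int) * q + min (i : Int) r
          ≤ ((i : Int) + 1) * q + min ((i : Int) + 1) r := by
        have h1 : (i : Int) * q ≤ ((i : Int) + 1) * q := by nlinarith
        have h2 : min (i : Int) r ≤ min ((i : Int) + 1) r := by omega
        omega
      -- replace the owner test by the index-range test
      have hfc : (PySem.List.enumerate images 0).filter
            (fun p => decide (ownerB q r p.1 = (i : Int)))
          = (PySem.List.enumerate images 0).filter
              (fun p => decide ((i : Int) * q + min (i : Int) r ≤ p.1 ∧
                        p.1 < ((i : Int) + 1) * q + min ((i : Int) + 1) r)) := by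
        apply List.filter_congr
        intro p hp
        obtain ⟨j, hjlt, hpeq⟩ := (PySem.List.mem_enumerate_iff images 0 p).mp hp
        subst hpeq
        simp only [zero_add]
        have hjn : (j : Int) < n := by rw [hn_def]; exact_mod_cast hjlt
        have := owner_iff q r k n (j : Int) (i : Int) hq0 hr0 hrk heq
          (Int.natCast_nonneg j) hjn (Int.natCast_nonneg i)
          (by rw [hk_def]; exact_mod_cast hilen)
        simp only [this]
      rw [hfc, filter_enum_range images 0
        ((i : Int) * q + min (i : Int) r) (((i : Int) + 1) * q + min ((i : Int) + 1) r),
        drop_take_eq_slice images _ _ hlo0 hlohi]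
  -- zipping names with the chunks is the closed-form pair list
  have hzip : names.zip ((PySem.List.enumerate images 0).foldl (stepB q r) init)
      = (PySem.List.enumerate names 0).map (fun p =>
          (p.2, PySem.List.slice images (some (p.1 * q + min p.1 r))
                  (some ((p.1 + 1) * q + min (p.1 + 1) r)))) := by
    rw [hchunks]
    apply List.ext_getElem
    · simp [PySem.List.enumerate_eq_zipIdx_map]
    · intro i hi1 hi2
      rw [List.getElem_zip, List.getElem_map, List.getElem_map,
        PySem.List.getElem_enumerate names 0 i
          (by simpa [PySem.List.enumerate_eq_zipIdx_map] using hi2)]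
  rw [hzip]
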